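-- pv_equiv track=rewrite | github.com/cyrustabatab/adventofcode | day_8.py | check_uniqueness
-- ===== SOURCE A (Python) =====
-- def check_uniqueness(values,letter_to_segment,segments_to_number):
--
--     seen = set()
--     for value in values:
--         sequence =[letter_to_segment.get(c) for c in value]
--         if None not in sequence:
--             sequence = tuple(sorted(sequence))
--             if sequence in segments_to_number:
--                 number = segments_to_number[sequence]
--                 if number in seen:
--                     return False
--                 seen.add(number)
--             else:
--                 return False
--
--     return True
-- ===== SOURCE B (Python) =====
-- def check_uniqueness(values, letter_to_segment, segments_to_number):
--     nums = []
--     for value in values: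
--         segs = [letter_to_segment[c] for c in value if c in letter_to_segment]
--         if len(segs) < len(value):
--             continue
--         nums.append(segments_to_number.get(tuple(sorted(segs))))
--     if None in nums:
--         return False
--     nums.sort()
--     return all(a != b for a, b in zip(nums, nums[1:]))
-- ===== Notes on version B (the rewrite author's own statement) =====
-- stated objective: alternative
-- what changed: B drops A's incrementally maintained 'seen' set and all in-loop failure returns: one pass collects each value's looked-up number (with None as a missing-key sentinel), a single post-loop membership test rejects missing keys, and uniqueness is decided by sorting the numbers and scanning adjacent pairs for equality instead of per-item set membership.
import Mathlib
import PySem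

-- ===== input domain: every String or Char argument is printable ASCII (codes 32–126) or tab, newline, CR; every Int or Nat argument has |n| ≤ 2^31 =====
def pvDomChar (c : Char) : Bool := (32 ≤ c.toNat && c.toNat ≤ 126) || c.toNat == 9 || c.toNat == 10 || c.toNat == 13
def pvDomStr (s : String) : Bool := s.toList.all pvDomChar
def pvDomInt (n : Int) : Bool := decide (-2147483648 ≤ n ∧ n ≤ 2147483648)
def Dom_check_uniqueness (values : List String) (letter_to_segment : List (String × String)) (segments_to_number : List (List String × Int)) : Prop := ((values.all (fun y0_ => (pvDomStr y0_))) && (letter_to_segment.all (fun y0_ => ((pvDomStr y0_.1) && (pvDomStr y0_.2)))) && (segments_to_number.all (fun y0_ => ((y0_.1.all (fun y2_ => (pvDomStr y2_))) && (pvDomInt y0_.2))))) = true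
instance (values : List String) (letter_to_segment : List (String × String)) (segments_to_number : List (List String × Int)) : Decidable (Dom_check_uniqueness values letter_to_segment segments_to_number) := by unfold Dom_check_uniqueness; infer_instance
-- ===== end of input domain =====

-- B removes A's running `seen` set and in-loop failure returns: it collects each value's
-- number (None = missing key) in one pass, rejects missing keys once after the loop, and
-- decides uniqueness by sorting the numbers and scanning adjacent pairs (objective: alternative).

-- ===== PORT A =====
-- A's loop: per value, look every letter up; values with an unmapped letter are skipped;
-- a sorted segment tuple that is not a key returns False; a number already in `seen`
-- returns False immediately.
def cuA_loop (letter_to_segment : List (String × String)) (segments_to_number : List (List String × Int)) : List String → PySem.Set Int → Bool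
  | [], _ => true
  | value :: rest, seen =>
    let sequence := value.toList.map (fun c => (PySem.Dict.mk letter_to_segment).get? (String.ofList [c]))
    if sequence.contains none = false then
      let key := PySem.List.sorted (sequence.filterMap (fun x => x)) (fun x => x) false
      match (PySem.Dict.mk segments_to_number).get? key with
      | some number =>
        if PySem.Set.contains seen number then false
        else cuA_loop letter_to_segment segments_to_number rest (PySem.Set.add seen number)
      | none => false
    else
      cuA_loop letter_to_segment segments_to_number rest seen

def check_uniqueness (values : List String) (letter_to_segment : List (String × String)) (segments_to_number : List (List String × Int)) : Bool :=
  cuA_loop letter_to_segment segments_to_number values PySem.Set.empty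

-- ===== PORT B =====
-- B's loop: nums.append(segments_to_number.get(tuple(sorted(segs)))) for every fully
-- mapped value ([lts[c] for c in value if c in lts] is the filterMap; the length test is
-- Python's `len(segs) < len(value)` skip).
def cuB_nums (letter_to_segment : List (String × String)) (segments_to_number : List (List String × Int)) : List String → List (Option Int)
  | [] => []
  | value :: rest =>
    let segs := value.toList.filterMap (fun c => (PySem.Dict.mk letter_to_segment).get? (String.ofList [c]))
    if segs.length < value.toList.length then
      cuB_nums letter_to_segment segments_to_number rest
    else
      (PySem.Dict.mk segments_to_number).get? (PySem.List.sorted segs (fun x => x) false) ::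
        cuB_nums letter_to_segment segments_to_number rest

-- `if None in nums: return False`; then `nums.sort()` and the adjacent-pair scan
-- `all(a != b for a, b in zip(nums, nums[1:]))`.
def check_uniqueness_alt (values : List String) (letter_to_segment : List (String × String)) (segments_to_number : List (List String × Int)) : Bool :=
  let nums := cuB_nums letter_to_segment segments_to_number values
  if nums.contains none then false
  else
    let ns := PySem.List.sorted (nums.filterMap (fun x => x)) (fun x => x) false
    (ns.zip ns.tail).all (fun p => p.1 != p.2)

-- ===== PRECONDITION & SPEC =====
def Spec_check_uniqueness (values : List String) (letter_to_segment : List (String × String)) (segments_to_number : List (List String × Int)) (out : Bool) : Prop := out = check_uniqueness_alt values letter_to_segment segments_to_number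
instance (values : List String) (letter_to_segment : List (String × String)) (segments_to_number : List (List String × Int)) (out : Bool) : Decidable (Spec_check_uniqueness values letter_to_segment segments_to_number out) := by unfold Spec_check_uniqueness; infer_instance

-- ===== CLAIM (what is proved, stated in full; the proofs are below) =====
def Claim_equal_check_uniqueness : Prop := ∀ (values : List String) (letter_to_segment : List (String × String)) (segments_to_number : List (List String × Int)), Dom_check_uniqueness values letter_to_segment segments_to_number → Spec_check_uniqueness values letter_to_segment segments_to_number (check_uniqueness values letter_to_segment segments_to_number)

-- ===== LEMMAS AND PROOFS =====

-- A's skip test `None in sequence` and B's skip test `len(segs) < len(value)` agree.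
lemma contains_none_map_eq {α : Type} (f : α → Option String) :
    ∀ (l : List α), (l.map f).contains none = decide ((l.filterMap f).length < l.length) := by
  intro l
  induction l with
  | nil => simp
  | cons c t ih =>
    cases hf : f c with
    | none => simp [hf, List.length_filterMap_le]
    | some a => simp [hf]

-- On a sorted (Pairwise ≤) list the adjacent-pair scan decides Nodup.
lemma adjacent_all_ne_eq_nodup :
    ∀ (s : List Int), s.Pairwise (· ≤ ·) →
      ((s.zip s.tail).all (fun p => p.1 != p.2)) = decide s.Nodup := by
  intro s
  induction s with
  | nil => intro _; simp
  | cons a t ih =>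
    intro hp
    cases t with
    | nil => simp
    | cons b u =>
      have hpt : (b :: u).Pairwise (· ≤ ·) := hp.tail
      have hab : a ≤ b := (List.pairwise_cons.mp hp).1 b (by simp)
      have hbx : ∀ x ∈ u, b ≤ x := fun x hx => (List.pairwise_cons.mp hpt).1 x hx
      have hih := ih hpt
      simp only [List.tail_cons] at hih
      show ((a != b) && (((b :: u).zip u).all (fun p => p.1 != p.2))) = decide (a :: b :: u).Nodup
      rw [hih, Bool.eq_iff_iff]
      simp only [Bool.and_eq_true, bne_iff_ne, ne_eq, decide_eq_true_eq, List.nodup_cons,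
        List.mem_cons]
      constructor
      · rintro ⟨hne, hrest⟩
        refine ⟨?_, hrest⟩
        rintro (rfl | hmem)
        · exact hne rfl
        · exact hne (le_antisymm hab (hbx a hmem))
      · rintro ⟨hnm, hrest⟩
        exact ⟨fun h => hnm (Or.inl h), hrest⟩

-- B's post-loop stage equals `decide (no None ∧ the collected numbers are distinct)`.
lemma final_eq (nums : List (Option Int)) :
    (if nums.contains none then false
     else
       let ns := PySem.List.sorted (nums.filterMap (fun x => x)) (fun x => x) false
       (ns.zip ns.tail).all (fun p => p.1 != p.2))
    = decide (nums.contains none = false ∧ (nums.filterMap (fun x => x)).Nodup) := by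
  by_cases h : nums.contains none = true
  · rw [if_pos h]
    symm
    rw [decide_eq_false_iff_not]
    rintro ⟨hb, -⟩
    rw [h] at hb
    exact absurd hb (by simp)
  · have hb : nums.contains none = false := by rwa [Bool.not_eq_true] at h
    rw [if_neg h]
    have hperm := PySem.List.sorted_perm (nums.filterMap (fun x => x)) (fun x => x) false
    have hpw := PySem.List.sorted_pairwise (nums.filterMap (fun x => x)) (fun x => x)
    show ((PySem.List.sorted (nums.filterMap (fun x => x)) (fun x => x) false).zip
        (PySem.List.sorted (nums.filterMap (fun x => x)) (fun x => x) false).tail).all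
        (fun p => p.1 != p.2) = _
    rw [adjacent_all_ne_eq_nodup _ hpw, Bool.eq_iff_iff]
    simp only [decide_eq_true_eq]
    rw [hperm.nodup_iff]
    have hmemn : none ∉ nums := by simpa using hb
    simp [hmemn]

-- Loop invariant: A's early-abort loop over `seen` equals B's collect-then-check form.
lemma loop_eq (lts : List (String × String)) (stn : List (List String × Int)) :
    ∀ (vs : List String) (seen : List Int), seen.Nodup →
      cuA_loop lts stn vs seen =
        decide ((cuB_nums lts stn vs).contains none = false ∧
                (seen ++ (cuB_nums lts stn vs).filterMap (fun x => x)).Nodup) := by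
  intro vs
  induction vs with
  | nil =>
    intro seen hnd
    simp [cuA_loop, cuB_nums, hnd]
  | cons v rest ih =>
    intro seen hnd
    simp only [cuA_loop]
    have hmapfm : (v.toList.map (fun c => (PySem.Dict.mk lts).get? (String.ofList [c]))).filterMap (fun x => x)
        = v.toList.filterMap (fun c => (PySem.Dict.mk lts).get? (String.ofList [c])) := by
      rw [List.filterMap_map]; rfl
    have hskip : (v.toList.map (fun c => (PySem.Dict.mk lts).get? (String.ofList [c]))).contains none
        = decide ((v.toList.filterMap (fun c => (PySem.Dict.mk lts).get? (String.ofList [c]))).length < v.toList.length) :=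
      contains_none_map_eq (fun c => (PySem.Dict.mk lts).get? (String.ofList [c])) v.toList
    by_cases hlen : (v.toList.filterMap (fun c => (PySem.Dict.mk lts).get? (String.ofList [c]))).length < v.toList.length
    · -- skipped value: both sides recurse unchanged
      have hBskip : cuB_nums lts stn (v :: rest) = cuB_nums lts stn rest := by
        rw [cuB_nums, if_pos hlen]
      rw [if_neg (by rw [hskip]; simp only [decide_eq_false_iff_not]; exact not_not_intro hlen)]
      simp only [hBskip]
      exact ih seen hnd
    · have hBcons : cuB_nums lts stn (v :: rest)
          = (PySem.Dict.mk stn).get? (PySem.List.sorted (v.toList.filterMap (fun c => (PySem.Dict.mk lts).get? (String.ofList [c]))) (fun x => x) false) :: cuB_nums lts stn rest := by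
        rw [cuB_nums, if_neg hlen]
      rw [if_pos (by rw [hskip]; simp only [decide_eq_false_iff_not]; exact hlen), hmapfm]
      simp only [hBcons]
      cases hkey : (PySem.Dict.mk stn).get?
          (PySem.List.sorted (v.toList.filterMap (fun c => (PySem.Dict.mk lts).get? (String.ofList [c]))) (fun x => x) false) with
      | none => simp
      | some n =>
        by_cases hmem : n ∈ seen
        · have hc : PySem.Set.contains seen n = true := (PySem.Set.contains_iff seen n).mpr hmem
          simp only [hc, if_true]
          have hnn : ¬ (seen ++ n :: (cuB_nums lts stn rest).filterMap (fun x => x)).Nodup := by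
            intro hh
            exact (List.nodup_append.mp hh).2.2 n hmem n (List.mem_cons_self ..) rfl
          simp [hnn]
        · have hc : PySem.Set.contains seen n = false := by
            rw [← Bool.not_eq_true, PySem.Set.contains_iff]; exact hmem
          have hadd : PySem.Set.add seen n = seen ++ [n] := PySem.Set.add_of_not_mem hmem
          have hnd' : (seen ++ [n]).Nodup := by
            rw [List.nodup_append]
            refine ⟨hnd, List.nodup_singleton n, ?_⟩
            intro a ha b hb he
            simp only [List.mem_singleton] at hb
            exact hmem ((he.trans hb) ▸ ha)
          simp only [hc, Bool.false_eq_true, if_false]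
          rw [hadd, ih (seen ++ [n]) hnd']
          simp [List.append_assoc]

-- ===== VERDICT (by name: the statement is the Claim_ definition above) =====
theorem check_uniqueness_spec : Claim_equal_check_uniqueness := by
  intro values lts stn _
  show cuA_loop lts stn values [] =
      (if (cuB_nums lts stn values).contains none then false
       else
         let ns := PySem.List.sorted ((cuB_nums lts stn values).filterMap (fun x => x)) (fun x => x) false
         (ns.zip ns.tail).all (fun p => p.1 != p.2))
  rw [loop_eq lts stn values [] List.nodup_nil, final_eq]
  simp
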